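-- pv_equiv track=rewrite | github.com/Ahaberling/MasterThesis | utilities/my_comparative_utils.py | get_nonSimilarity_descriptives
-- ===== SOURCE A (Python) =====
-- def get_nonSimilarity_descriptives(diffusionArray_Topics_lp_columns, diffusion_length_list):
--     diff_count_per_topic = []
--     diff_duration_per_topic = []
--
--     for topic in range(len(diffusionArray_Topics_lp_columns)):
--         diff_count = 0
--         diff_duration = []
--         for entry in diffusion_length_list:
--             if entry[1] == topic:
--                 diff_count = diff_count+1
--                 diff_duration.append(entry[2])
--
--         diff_count_per_topic.append(diff_count)
--         diff_duration_per_topic.append(diff_duration)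
--
--     return  diff_count_per_topic, diff_duration_per_topic
-- ===== SOURCE B (Python) =====
-- def get_nonSimilarity_descriptives(diffusionArray_Topics_lp_columns, diffusion_length_list):
--     n = len(diffusionArray_Topics_lp_columns)
--     buckets = [[] for _ in range(n)]
--     for entry in diffusion_length_list:
--         t = entry[1]
--         if 0 <= t < n:
--             buckets[t].append(entry[2])
--     return [len(b) for b in buckets], buckets
-- ===== Notes on version B (the rewrite author's own statement) =====
-- stated objective: faster
-- what changed: replaces the per-topic rescan of all entries (topics x entries nested loops) by a single pass that buckets each entry into a preallocated per-topic list keyed by entry[1]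
-- outside the precondition, e.g. on get_nonSimilarity_descriptives([], [[5]]): A returns ([], []), B raises IndexError
import Mathlib
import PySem

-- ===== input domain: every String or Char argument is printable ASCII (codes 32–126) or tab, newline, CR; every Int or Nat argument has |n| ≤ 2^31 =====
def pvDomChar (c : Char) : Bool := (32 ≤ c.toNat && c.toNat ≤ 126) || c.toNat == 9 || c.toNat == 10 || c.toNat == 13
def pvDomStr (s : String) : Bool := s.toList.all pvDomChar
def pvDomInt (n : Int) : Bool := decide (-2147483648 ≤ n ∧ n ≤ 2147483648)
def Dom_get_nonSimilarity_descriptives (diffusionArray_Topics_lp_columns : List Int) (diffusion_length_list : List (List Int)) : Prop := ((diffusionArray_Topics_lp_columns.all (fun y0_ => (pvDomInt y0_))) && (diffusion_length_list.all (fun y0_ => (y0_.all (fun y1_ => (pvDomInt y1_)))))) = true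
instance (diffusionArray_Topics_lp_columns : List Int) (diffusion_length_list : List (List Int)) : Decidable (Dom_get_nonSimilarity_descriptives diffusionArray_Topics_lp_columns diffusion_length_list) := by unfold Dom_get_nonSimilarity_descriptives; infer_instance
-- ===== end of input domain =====

-- B replaces A's per-topic rescan of all entries by a single bucketing pass keyed by entry[1] (objective: faster).

-- ===== PORT A =====
-- entry[1] / entry[2] ported as pyGetD with default 0; Pre_ guarantees the reads are in range, so the default is never the value used.
def get_nonSimilarity_descriptives (diffusionArray_Topics_lp_columns : List Int) (diffusion_length_list : List (List Int)) : List Int × List (List Int) :=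
  (PySem.List.pyRange 0 diffusionArray_Topics_lp_columns.length 1).foldl
    (fun acc topic =>
      let r := diffusion_length_list.foldl
        (fun (st : Int × List Int) entry =>
          if PySem.List.pyGetD entry 1 0 = topic
          then (st.1 + 1, st.2 ++ [PySem.List.pyGetD entry 2 0])
          else st)
        ((0 : Int), ([] : List Int))
      (acc.1 ++ [r.1], acc.2 ++ [r.2]))
    ([], [])

-- ===== PORT B =====
-- buckets[t].append(x): append x to the t-th inner list
def pvBucketAdd : List (List Int) → Nat → Int → List (List Int)
  | [], _, _ => []
  | b :: bs, 0, x => (b ++ [x]) :: bs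
  | b :: bs, t + 1, x => b :: pvBucketAdd bs t x

def get_nonSimilarity_descriptives_alt (diffusionArray_Topics_lp_columns : List Int) (diffusion_length_list : List (List Int)) : List Int × List (List Int) :=
  let n := diffusionArray_Topics_lp_columns.length
  let buckets := diffusion_length_list.foldl
    (fun bs entry =>
      let t := PySem.List.pyGetD entry 1 0
      if 0 ≤ t ∧ t < (n : Int) then pvBucketAdd bs t.toNat (PySem.List.pyGetD entry 2 0) else bs)
    (List.replicate n [])
  (buckets.map (fun b => (b.length : Int)), buckets)

-- ===== PRECONDITION & SPEC =====
-- Pre_ excludes exactly the inputs on which a Python run hits an IndexError on entry[1]/entry[2]: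
-- every entry needs length ≥ 2 (B always reads entry[1]; A does whenever there is at least one topic),
-- and an entry whose entry[1] lands in [0, #topics) needs length ≥ 3 for entry[2].
-- This excludes some inputs A returns on (no topics but an entry shorter than 2), where B raises; see the cite.
def Pre_get_nonSimilarity_descriptives (diffusionArray_Topics_lp_columns : List Int) (diffusion_length_list : List (List Int)) : Prop :=
  ∀ e ∈ diffusion_length_list, 2 ≤ e.length ∧
    (0 ≤ PySem.List.pyGetD e 1 0 → PySem.List.pyGetD e 1 0 < (diffusionArray_Topics_lp_columns.length : Int) → 3 ≤ e.length)
instance (diffusionArray_Topics_lp_columns : List Int) (diffusion_length_list : List (List Int)) : Decidable (Pre_get_nonSimilarity_descriptives diffusionArray_Topics_lp_columns diffusion_length_list) := by unfold Pre_get_nonSimilarity_descriptives; infer_instance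

def pvWitness_get_nonSimilarity_descriptives : List Int × List (List Int) := ([7, 8], [[0, 1, 4], [0, 0, 2], [0, 5, 9]])

def Spec_get_nonSimilarity_descriptives (diffusionArray_Topics_lp_columns : List Int) (diffusion_length_list : List (List Int)) (out : List Int × List (List Int)) : Prop := out = get_nonSimilarity_descriptives_alt diffusionArray_Topics_lp_columns diffusion_length_list
instance (diffusionArray_Topics_lp_columns : List Int) (diffusion_length_list : List (List Int)) (out : List Int × List (List Int)) : Decidable (Spec_get_nonSimilarity_descriptives diffusionArray_Topics_lp_columns diffusion_length_list out) := by unfold Spec_get_nonSimilarity_descriptives; infer_instance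

-- ===== CLAIM (what is proved, stated in full; the proofs are below) =====
def Claim_equal_get_nonSimilarity_descriptives : Prop := ∀ (diffusionArray_Topics_lp_columns : List Int) (diffusion_length_list : List (List Int)), Dom_get_nonSimilarity_descriptives diffusionArray_Topics_lp_columns diffusion_length_list → Pre_get_nonSimilarity_descriptives diffusionArray_Topics_lp_columns diffusion_length_list → Spec_get_nonSimilarity_descriptives diffusionArray_Topics_lp_columns diffusion_length_list (get_nonSimilarity_descriptives diffusionArray_Topics_lp_columns diffusion_length_list)

-- ===== LEMMAS AND PROOFS =====

-- the common value both sides compute per topic t: the entry[2]-projection of the entries with entry[1] = t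
def pvSel (lst : List (List Int)) (t : Int) : List Int :=
  (lst.filter (fun e => decide (PySem.List.pyGetD e 1 0 = t))).map (fun e => PySem.List.pyGetD e 2 0)

-- A's inner loop: a running count and a running append over the matching entries
theorem pvInner_eq (lst : List (List Int)) (t : Int) : ∀ (c : Int) (d : List Int),
    lst.foldl (fun (st : Int × List Int) entry =>
        if PySem.List.pyGetD entry 1 0 = t
        then (st.1 + 1, st.2 ++ [PySem.List.pyGetD entry 2 0]) else st) (c, d)
      = (c + ((lst.filter (fun e => decide (PySem.List.pyGetD e 1 0 = t))).length : Int), d ++ pvSel lst t) := by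
  induction lst with
  | nil => intro c d; simp [pvSel]
  | cons e lst ih =>
    intro c d
    simp only [List.foldl_cons]
    by_cases h : PySem.List.pyGetD e 1 0 = t
    · rw [if_pos h, ih]
      simp [pvSel, h]
      omega
    · rw [if_neg h, ih]
      simp [pvSel, h]

-- A's outer loop in closed form
theorem pvOuterA (lst : List (List Int)) (R : List Int) :
    ∀ (xs : List Int) (ys : List (List Int)),
      R.foldl (fun acc topic =>
          let r := lst.foldl
            (fun (st : Int × List Int) entry =>
              if PySem.List.pyGetD entry 1 0 = topic
              then (st.1 + 1, st.2 ++ [PySem.List.pyGetD entry 2 0]) else st)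
            ((0 : Int), ([] : List Int))
          (acc.1 ++ [r.1], acc.2 ++ [r.2])) (xs, ys)
        = (xs ++ R.map (fun t => ((lst.filter (fun e => decide (PySem.List.pyGetD e 1 0 = t))).length : Int)),
           ys ++ R.map (fun t => pvSel lst t)) := by
  induction R with
  | nil => intro xs ys; simp
  | cons t R ih =>
    intro xs ys
    simp only [List.foldl_cons, pvInner_eq lst t 0 []]
    rw [ih]
    simp

theorem pvBucketAdd_length (bs : List (List Int)) (j : Nat) (x : Int) :
    (pvBucketAdd bs j x).length = bs.length := by
  induction bs generalizing j with
  | nil => simp [pvBucketAdd]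
  | cons b bs ih => cases j with
    | zero => simp [pvBucketAdd]
    | succ t => simp [pvBucketAdd, ih]

theorem pvBucketAdd_get (bs : List (List Int)) (j : Nat) (x : Int) (i : Nat) (h : i < bs.length) :
    (pvBucketAdd bs j x)[i]'(by rw [pvBucketAdd_length]; exact h)
      = if i = j then bs[i] ++ [x] else bs[i] := by
  induction bs generalizing j i with
  | nil => simp at h
  | cons b bs ih =>
    cases j with
    | zero =>
      cases i with
      | zero => simp [pvBucketAdd]
      | succ i => simp [pvBucketAdd]
    | succ t =>
      cases i with
      | zero => simp [pvBucketAdd]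
      | succ i =>
        have h' : i < bs.length := by simpa using h
        simp only [pvBucketAdd, List.getElem_cons_succ]
        rw [ih t i h']
        by_cases he : i = t <;> simp [he]

-- B's bucketing pass keeps the bucket count
theorem pvFold_length (n : Nat) (lst : List (List Int)) : ∀ (bs : List (List Int)),
    (lst.foldl (fun bs entry =>
        let t := PySem.List.pyGetD entry 1 0
        if 0 ≤ t ∧ t < (n : Int) then pvBucketAdd bs t.toNat (PySem.List.pyGetD entry 2 0) else bs) bs).length
      = bs.length := by
  induction lst with
  | nil => intro bs; simp
  | cons e lst ih =>
    intro bs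
    simp only [List.foldl_cons]
    split
    · rw [ih, pvBucketAdd_length]
    · rw [ih]

-- B's bucketing pass, pointwise: bucket i collects exactly the entries with entry[1] = i
theorem pvFold_get (n : Nat) (lst : List (List Int)) : ∀ (bs : List (List Int)) (hbs : bs.length = n)
    (i : Nat) (hi : i < n),
    (lst.foldl (fun bs entry =>
        let t := PySem.List.pyGetD entry 1 0
        if 0 ≤ t ∧ t < (n : Int) then pvBucketAdd bs t.toNat (PySem.List.pyGetD entry 2 0) else bs) bs)[i]'(by
          rw [pvFold_length]; omega)
      = bs[i]'(by omega) ++ pvSel lst (i : Int) := by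
  induction lst with
  | nil => intro bs hbs i hi; simp [pvSel]
  | cons e lst ih =>
    intro bs hbs i hi
    simp only [List.foldl_cons]
    by_cases hg : 0 ≤ PySem.List.pyGetD e 1 0 ∧ PySem.List.pyGetD e 1 0 < (n : Int)
    · simp only [if_pos hg]
      have hlen : (pvBucketAdd bs (PySem.List.pyGetD e 1 0).toNat (PySem.List.pyGetD e 2 0)).length = n := by
        rw [pvBucketAdd_length]; exact hbs
      rw [ih _ hlen i hi]
      rw [pvBucketAdd_get bs _ _ i (by omega)]
      by_cases he : i = (PySem.List.pyGetD e 1 0).toNat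
      · have ht : PySem.List.pyGetD e 1 0 = (i : Int) := by omega
        rw [if_pos he]
        simp only [pvSel, List.filter_cons, ht, decide_true, List.append_assoc,
          List.singleton_append]
        simp
      · have ht : ¬ (PySem.List.pyGetD e 1 0 = (i : Int)) := by omega
        rw [if_neg he]
        simp only [pvSel, List.filter_cons]
        simp [ht]
    · simp only [if_neg hg]
      rw [ih _ hbs i hi]
      have ht : ¬ (PySem.List.pyGetD e 1 0 = (i : Int)) := by omega
      simp only [pvSel, List.filter_cons]
      simp [ht]

-- both ports in the same closed form over topics 0..n-1
theorem pvA_closed (cols : List Int) (lst : List (List Int)) :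
    get_nonSimilarity_descriptives cols lst
      = ((List.range cols.length).map (fun (i : Nat) => (((pvSel lst (i : Int)).length : Nat) : Int)),
         (List.range cols.length).map (fun (i : Nat) => pvSel lst (i : Int))) := by
  unfold get_nonSimilarity_descriptives
  rw [pvOuterA lst _ [] []]
  rw [PySem.List.pyRange_one]
  simp only [List.map_map, Function.comp_def, List.nil_append, Int.sub_zero, Int.toNat_natCast]
  refine congrArg₂ Prod.mk ?_ ?_ <;>
  · apply List.map_congr_left
    intro k _
    simp [pvSel]

theorem pvB_closed (cols : List Int) (lst : List (List Int)) :
    get_nonSimilarity_descriptives_alt cols lst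
      = ((List.range cols.length).map (fun (i : Nat) => (((pvSel lst (i : Int)).length : Nat) : Int)),
         (List.range cols.length).map (fun (i : Nat) => pvSel lst (i : Int))) := by
  unfold get_nonSimilarity_descriptives_alt
  have hb : (lst.foldl (fun bs entry =>
        let t := PySem.List.pyGetD entry 1 0
        if 0 ≤ t ∧ t < (cols.length : Int) then pvBucketAdd bs t.toNat (PySem.List.pyGetD entry 2 0) else bs)
        (List.replicate cols.length []))
      = (List.range cols.length).map (fun (i : Nat) => pvSel lst (i : Int)) := by
    apply List.ext_getElem
    · rw [pvFold_length]; simp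
    · intro i h1 h2
      have hi : i < cols.length := by
        have hl := pvFold_length cols.length lst (List.replicate cols.length ([] : List Int))
        rw [hl] at h1; simpa using h1
      rw [pvFold_get cols.length lst (List.replicate cols.length []) (by simp) i hi]
      rw [List.getElem_map, List.getElem_range]
      simp
  simp only [hb, List.map_map, Function.comp_def]

-- ===== VERDICT (by name: the statement is the Claim_ definition above) =====
theorem get_nonSimilarity_descriptives_spec : Claim_equal_get_nonSimilarity_descriptives := by
  intro cols lst _ _
  unfold Spec_get_nonSimilarity_descriptives
  rw [pvA_closed, pvB_closed]
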